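-- pv_equiv track=rewrite | github.com/Ashiq-am/Path-of-Python | 39.Python Programming Examples/3.List Programs/Python  Remove sublists that are present in another sublist/Method #2.py | removeSublist
-- ===== SOURCE A (Python) =====
-- from collections import OrderedDict
--
-- def removeSublist(lst):
--     curr_result = []
--     result = []
--     for ele in sorted(map(OrderedDict.fromkeys, lst), key=len, reverse=True):
--         if not any(ele.keys() <= req.keys() for req in curr_result):
--             curr_result.append(ele)
--             result.append(list(ele))
--
--     return result
-- ===== SOURCE B (Python) =====
-- def removeSublist(lst):
--     # Online maximal-set computation: no presort. Scan the deduplicated sublists in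
--     # original order keeping a list of current maxima; a new sublist is dropped if it
--     # is a subset of a current maximum, otherwise it evicts the strict subsets among
--     # the maxima and joins them. Survivors are emitted in length-descending stable order.
--     keys = [list(dict.fromkeys(sub)) for sub in lst]
--     maxima = []  # (index, key) pairs of the current non-dominated sublists, index order
--     for i, k in enumerate(keys):
--         sk = set(k)
--         if any(sk <= set(m) for _, m in maxima):
--             continue
--         maxima = [(j, m) for j, m in maxima if not (set(m) <= sk and len(m) < len(k))]
--         maxima.append((i, k))
--     return sorted([k for _, k in maxima], key=len, reverse=True)
-- ===== Notes on version B (the rewrite author's own statement) =====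
-- stated objective: alternative
-- what changed: Replaces A's sort-then-greedy-accumulator scan with an online maximal-set algorithm: no presort, one pass over the deduplicated sublists in original order maintaining the current maxima (a newcomer is dropped if it is a subset of a maximum, otherwise it evicts its strict subsets and joins), sorting only the survivors at the end.
import Mathlib
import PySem

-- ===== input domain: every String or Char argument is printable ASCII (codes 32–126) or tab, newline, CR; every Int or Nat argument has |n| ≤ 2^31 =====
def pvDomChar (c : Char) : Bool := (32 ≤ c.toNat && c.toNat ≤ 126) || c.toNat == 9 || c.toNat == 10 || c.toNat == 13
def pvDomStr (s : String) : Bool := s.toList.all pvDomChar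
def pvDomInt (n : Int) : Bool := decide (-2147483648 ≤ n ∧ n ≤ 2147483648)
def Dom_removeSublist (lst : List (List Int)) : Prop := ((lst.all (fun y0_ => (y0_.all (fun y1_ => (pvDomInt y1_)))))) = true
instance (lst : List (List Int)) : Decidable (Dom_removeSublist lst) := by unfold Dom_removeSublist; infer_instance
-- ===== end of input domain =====

-- B replaces A's sort-then-greedy-accumulator scan by a direct pairwise dominance
-- test on the original deduplicated sublists, sorting only the survivors (alternative
-- decomposition, same exact output).

-- ===== PORT A =====
-- OrderedDict.fromkeys = ordered dedup; len(dict) = dedup length; ele.keys() <= req.keys()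
-- is set subset; list(ele) = the dedup list itself.
def removeSublist (lst : List (List Int)) : List (List Int) :=
  ((PySem.List.sorted (lst.map PySem.List.dedup) (fun ele => ele.length) true).foldl
      (fun st ele =>
        if !(st.1.any (fun req => PySem.Set.issubset ele req)) then
          (st.1 ++ [ele], st.2 ++ [ele])
        else st)
      (([] : List (List Int)), ([] : List (List Int)))).2

-- ===== PORT B =====
-- loop body of Source B: drop a newcomer that is a subset of a current maximum,
-- otherwise evict its strict subsets and append it (entries are (index, key, set(key)))
def pvStepB (M : List (Int × List Int × List Int)) (p : Int × List Int) :
    List (Int × List Int × List Int) :=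
  let sk := PySem.Set.ofList p.2
  if M.any (fun t => PySem.Set.issubset sk t.2.2) then M
  else (M.filter (fun t =>
      !(PySem.Set.issubset t.2.2 sk && decide (t.2.1.length < p.2.length)))) ++ [(p.1, p.2, sk)]

def removeSublist_alt (lst : List (List Int)) : List (List Int) :=
  let keys := lst.map PySem.List.dedup
  let maxima := (PySem.List.enumerate keys).foldl pvStepB []
  PySem.List.sorted (maxima.map (fun t => t.2.1)) (fun k => k.length) true

-- ===== PRECONDITION & SPEC =====
def Spec_removeSublist (lst : List (List Int)) (out : List (List Int)) : Prop := out = removeSublist_alt lst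
instance (lst : List (List Int)) (out : List (List Int)) : Decidable (Spec_removeSublist lst out) := by unfold Spec_removeSublist; infer_instance

-- ===== CLAIM (what is proved, stated in full; the proofs are below) =====
def Claim_equal_removeSublist : Prop := ∀ (lst : List (List Int)), Dom_removeSublist lst → Spec_removeSublist lst (removeSublist lst)

-- ===== LEMMAS AND PROOFS =====

-- pvCovered ps p: is sublist p dominated by some other sublist q of ps? (the global
-- pairwise dominance test; both the greedy scan of A and the maxima loop of B are
-- proved to keep exactly the sublists not covered this way)
def pvCovered (ps : List (Int × List Int)) (p : Int × List Int) : Bool :=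
  ps.any (fun q => q.1 != p.1 && PySem.Set.issubset p.2 q.2 &&
                   (decide (p.2.length < q.2.length) || decide (q.1 < p.1)))

-- the comparison used by the reverse stable sort with key = length of the second component
def pvBefore (a c : Int × List Int) : Bool := decide (c.2.length < a.2.length)
-- same, on plain value lists (key = length)
def pvBeforeV (a c : List Int) : Bool := decide (c.length < a.length)
-- the stability order of the sorted pair list: later entries have smaller length,
-- or equal length and a larger original index
def pvS (a c : Int × List Int) : Prop :=
  c.2.length < a.2.length ∨ (c.2.length = a.2.length ∧ a.1 < c.1)

theorem pv_insertBy_nil {α : Type} (b : α → α → Bool) (x : α) :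
    PySem.List.insertBy b x [] = [x] := rfl

theorem pv_insertBy_cons {α : Type} (b : α → α → Bool) (x y : α) (ys : List α) :
    PySem.List.insertBy b x (y :: ys) =
      if b x y then x :: y :: ys else y :: PySem.List.insertBy b x ys := rfl

theorem pv_insertBy_forall {α : Type} (b : α → α → Bool) (x : α) (ys : List α)
    (h : ∀ y ∈ ys, b x y = true) : PySem.List.insertBy b x ys = x :: ys := by
  cases ys with
  | nil => rfl
  | cons y ys => rw [pv_insertBy_cons, if_pos (h y (List.mem_cons_self ..))]

theorem pv_sortedP_foldl (xs : List (Int × List Int)) :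
    PySem.List.sorted xs (fun p => p.2.length) true =
      xs.foldl (fun acc x => PySem.List.insertBy pvBefore x acc) [] := by
  rw [PySem.List.sorted_rev_eq_foldl_insertBy]; rfl

theorem pv_sortedV_foldl (xs : List (List Int)) :
    PySem.List.sorted xs (fun k => k.length) true =
      xs.foldl (fun acc x => PySem.List.insertBy pvBeforeV x acc) [] := by
  rw [PySem.List.sorted_rev_eq_foldl_insertBy]; rfl

theorem pv_map_snd_insertBy (x : Int × List Int) (acc : List (Int × List Int)) :
    (PySem.List.insertBy pvBefore x acc).map (fun p => p.2) =
      PySem.List.insertBy pvBeforeV x.2 (acc.map (fun p => p.2)) := by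
  induction acc with
  | nil => rfl
  | cons a rest ih =>
      rw [pv_insertBy_cons, List.map_cons, pv_insertBy_cons]
      have hb : pvBefore x a = pvBeforeV x.2 a.2 := rfl
      by_cases h : pvBefore x a = true
      · rw [if_pos h, if_pos (hb ▸ h)]; rfl
      · rw [if_neg h, if_neg (fun hc => h (hb ▸ hc)), List.map_cons, ih]

theorem pv_map_snd_foldl (xs : List (Int × List Int)) :
    ∀ acc : List (Int × List Int),
    (xs.foldl (fun acc x => PySem.List.insertBy pvBefore x acc) acc).map (fun p => p.2) =
      xs.foldl (fun acc x => PySem.List.insertBy pvBeforeV x.2 acc) (acc.map (fun p => p.2)) := by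
  induction xs with
  | nil => intro acc; rfl
  | cons x xs ih =>
      intro acc
      simp only [List.foldl_cons, ih, pv_map_snd_insertBy]

theorem pv_map_snd_sorted (xs : List (Int × List Int)) :
    (PySem.List.sorted xs (fun p => p.2.length) true).map (fun p => p.2) =
      PySem.List.sorted (xs.map (fun p => p.2)) (fun k : List Int => k.length) true := by
  rw [pv_sortedP_foldl, pv_sortedV_foldl, pv_map_snd_foldl, List.foldl_map]
  rfl

-- filter commutes with insertion into a length-descending list
theorem pv_filter_insertBy (g : Int × List Int → Bool) (x : Int × List Int)
    (acc : List (Int × List Int))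
    (hd : acc.Pairwise (fun a c => c.2.length ≤ a.2.length)) :
    (PySem.List.insertBy pvBefore x acc).filter g =
      if g x then PySem.List.insertBy pvBefore x (acc.filter g) else acc.filter g := by
  induction acc with
  | nil =>
      rw [pv_insertBy_nil]
      by_cases hx : g x = true
      · simp [hx, pv_insertBy_nil]
      · simp [hx]
  | cons a rest ih =>
      have ha : ∀ z ∈ rest, z.2.length ≤ a.2.length := (List.pairwise_cons.mp hd).1
      have hrest := (List.pairwise_cons.mp hd).2
      by_cases hb : pvBefore x a = true
      · rw [pv_insertBy_cons, if_pos hb]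
        have hxa : a.2.length < x.2.length := by
          have := of_decide_eq_true hb; exact this
        by_cases hx : g x = true
        · rw [if_pos hx]
          by_cases hga : g a = true
          · simp only [List.filter_cons, hx, hga, if_pos]
            rw [pv_insertBy_cons, if_pos hb]
          · simp only [List.filter_cons, hx, hga]
            simp only [if_pos, Bool.false_eq_true, if_false]
            rw [pv_insertBy_forall]
            intro z hz
            have hz' : z ∈ rest := List.mem_of_mem_filter hz
            exact decide_eq_true (lt_of_le_of_lt (ha z hz') hxa)
        · simp only [List.filter_cons, hx, Bool.false_eq_true, if_false]
      · rw [pv_insertBy_cons, if_neg hb]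
        by_cases hga : g a = true
        · simp only [List.filter_cons, hga, if_pos, ih hrest]
          by_cases hx : g x = true
          · rw [if_pos hx, if_pos hx, pv_insertBy_cons, if_neg hb]
          · rw [if_neg hx, if_neg hx]
        · simp only [List.filter_cons, hga, Bool.false_eq_true, if_false, ih hrest]

theorem pv_pairwise_desc_insertBy (x : Int × List Int) (acc : List (Int × List Int))
    (hd : acc.Pairwise (fun a c => c.2.length ≤ a.2.length)) :
    (PySem.List.insertBy pvBefore x acc).Pairwise (fun a c => c.2.length ≤ a.2.length) := by
  induction acc with
  | nil => simp [pv_insertBy_nil]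
  | cons a rest ih =>
      have ha := (List.pairwise_cons.mp hd).1
      have hrest := (List.pairwise_cons.mp hd).2
      rw [pv_insertBy_cons]
      by_cases hb : pvBefore x a = true
      · rw [if_pos hb]
        have hxa : a.2.length < x.2.length := of_decide_eq_true hb
        refine List.pairwise_cons.mpr ⟨?_, hd⟩
        intro z hz
        rcases List.mem_cons.mp hz with h | h
        · exact h ▸ le_of_lt hxa
        · exact le_trans (ha z h) (le_of_lt hxa)
      · rw [if_neg hb]
        have hax : x.2.length ≤ a.2.length := by
          have := of_decide_eq_false (eq_false_of_ne_true hb)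
          omega
        refine List.pairwise_cons.mpr ⟨?_, ih hrest⟩
        intro z hz
        rcases (PySem.List.mem_insertBy pvBefore x z rest).mp hz with h | h
        · exact h ▸ hax
        · exact ha z h

theorem pv_filter_foldl (g : Int × List Int → Bool) (xs : List (Int × List Int)) :
    ∀ acc : List (Int × List Int), acc.Pairwise (fun a c => c.2.length ≤ a.2.length) →
    (xs.foldl (fun acc x => PySem.List.insertBy pvBefore x acc) acc).filter g =
      (xs.filter g).foldl (fun acc x => PySem.List.insertBy pvBefore x acc) (acc.filter g) := by
  induction xs with
  | nil => intro acc _; rfl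
  | cons x xs ih =>
      intro acc hd
      simp only [List.foldl_cons, List.filter_cons]
      rw [ih _ (pv_pairwise_desc_insertBy x acc hd), pv_filter_insertBy g x acc hd]
      by_cases hx : g x = true
      · rw [if_pos hx, if_pos hx, List.foldl_cons]
      · simp only [hx, Bool.false_eq_true, if_false]

theorem pv_sorted_filter (g : Int × List Int → Bool) (xs : List (Int × List Int)) :
    PySem.List.sorted (xs.filter g) (fun p => p.2.length) true =
      (PySem.List.sorted xs (fun p => p.2.length) true).filter g := by
  rw [pv_sortedP_foldl, pv_sortedP_foldl]
  exact (pv_filter_foldl g xs [] List.Pairwise.nil).symm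

-- stability: inserting an element whose original index is larger than everything present
theorem pv_pairwise_S_insertBy (x : Int × List Int) (acc : List (Int × List Int))
    (h : acc.Pairwise pvS) (hidx : ∀ y ∈ acc, y.1 < x.1) :
    (PySem.List.insertBy pvBefore x acc).Pairwise pvS := by
  induction acc with
  | nil => simp [pv_insertBy_nil]
  | cons a rest ih =>
      have ha := (List.pairwise_cons.mp h).1
      have hrest := (List.pairwise_cons.mp h).2
      rw [pv_insertBy_cons]
      by_cases hb : pvBefore x a = true
      · rw [if_pos hb]
        have hxa : a.2.length < x.2.length := of_decide_eq_true hb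
        refine List.pairwise_cons.mpr ⟨?_, h⟩
        intro z hz
        rcases List.mem_cons.mp hz with hz | hz
        · exact Or.inl (hz ▸ hxa)
        · have : z.2.length ≤ a.2.length := by
            rcases ha z hz with h1 | h1
            · exact le_of_lt h1
            · exact le_of_eq h1.1
          exact Or.inl (lt_of_le_of_lt this hxa)
      · rw [if_neg hb]
        have hax : x.2.length ≤ a.2.length := by
          have := of_decide_eq_false (eq_false_of_ne_true hb); omega
        refine List.pairwise_cons.mpr ⟨?_, ?_⟩
        · intro z hz
          rcases (PySem.List.mem_insertBy pvBefore x z rest).mp hz with hz | hz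
          · subst hz
            rcases lt_or_eq_of_le hax with h1 | h1
            · exact Or.inl h1
            · exact Or.inr ⟨h1, hidx a (List.mem_cons_self ..)⟩
          · exact ha z hz
        · exact ih hrest (fun y hy => hidx y (List.mem_cons_of_mem a hy))

theorem pv_pairwise_S_foldl (xs : List (Int × List Int)) :
    ∀ acc : List (Int × List Int), acc.Pairwise pvS →
    (∀ y ∈ acc, ∀ q ∈ xs, y.1 < q.1) → xs.Pairwise (fun a c => a.1 < c.1) →
    (xs.foldl (fun acc x => PySem.List.insertBy pvBefore x acc) acc).Pairwise pvS := by
  induction xs with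
  | nil => intro acc h _ _; exact h
  | cons x xs ih =>
      intro acc h hcross hxs
      have hx := (List.pairwise_cons.mp hxs).1
      have hxs' := (List.pairwise_cons.mp hxs).2
      simp only [List.foldl_cons]
      refine ih _ (pv_pairwise_S_insertBy x acc h ?_) ?_ hxs'
      · exact fun y hy => hcross y hy x (List.mem_cons_self ..)
      · intro y hy q hq
        rcases (PySem.List.mem_insertBy pvBefore x y acc).mp hy with hy | hy
        · exact hy ▸ hx q hq
        · exact hcross y hy q (List.mem_cons_of_mem x hq)

theorem pv_nodup_subset_length {l₁ l₂ : List Int} (h : l₁.Nodup) (hs : l₁ ⊆ l₂) :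
    l₁.length ≤ l₂.length := by
  calc l₁.length = l₁.toFinset.card := (List.toFinset_card_of_nodup h).symm
    _ ≤ l₂.toFinset.card := Finset.card_le_card (by
        intro a ha
        rw [List.mem_toFinset] at *
        exact hs ha)
    _ ≤ l₂.length := l₂.toFinset_card_le

theorem pv_covered_iff (ps : List (Int × List Int)) (p : Int × List Int) :
    pvCovered ps p = true ↔
      ∃ q ∈ ps, q.1 ≠ p.1 ∧ (∀ z ∈ p.2, z ∈ q.2) ∧
        (p.2.length < q.2.length ∨ q.1 < p.1) := by
  simp [pvCovered, List.any_eq_true, PySem.Set.issubset_iff, bne_iff_ne,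
    Bool.and_eq_true, Bool.or_eq_true, decide_eq_true_eq, and_assoc]

-- A's greedy scan over the sorted list keeps exactly the non-dominated elements
theorem pv_greedy_go (ps : List (Int × List Int)) :
    ∀ (t : List (Int × List Int)) (c res : List (List Int)),
    t.Pairwise pvS →
    t.Pairwise (fun a b => a.1 ≠ b.1) →
    (∀ p ∈ t, p.2.Nodup) →
    (∀ p ∈ t, p ∈ ps) →
    (∀ k ∈ c, ∃ q ∈ ps, q.2 = k ∧ ∀ p' ∈ t, pvS q p' ∧ q.1 ≠ p'.1) →
    (∀ q ∈ ps, q ∉ t → ∃ k ∈ c, q.2 ⊆ k) →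
    ((t.map (fun p => p.2)).foldl
        (fun st ele => if !(st.1.any (fun req => PySem.Set.issubset ele req)) then
            (st.1 ++ [ele], st.2 ++ [ele]) else st)
        (c, res)).2
      = res ++ (t.filter (fun p => !pvCovered ps p)).map (fun p => p.2) := by
  intro t
  induction t with
  | nil => intro c res _ _ _ _ _ _; simp
  | cons x t ih =>
      intro c res hS hne hnd hsub hc1 hc2
      have hSx := (List.pairwise_cons.mp hS).1
      have hSt := (List.pairwise_cons.mp hS).2
      have hnex := (List.pairwise_cons.mp hne).1
      have hnet := (List.pairwise_cons.mp hne).2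
      -- the greedy test at x equals the global dominance test at x
      have hkey : (c.any (fun req => PySem.Set.issubset x.2 req)) = pvCovered ps x := by
        by_cases h : (c.any (fun req => PySem.Set.issubset x.2 req)) = true
        · rw [h]
          rcases List.any_eq_true.mp h with ⟨req, hreq, hss⟩
          rcases hc1 req hreq with ⟨q, hqps, hq2, hqall⟩
          rcases hqall x (List.mem_cons_self ..) with ⟨hqS, hqne⟩
          refine ((pv_covered_iff ps x).mpr ⟨q, hqps, hqne, ?_, ?_⟩).symm
          · intro z hz
            rw [hq2]
            exact ((PySem.Set.issubset_iff x.2 req).mp hss) z hz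
          · rcases hqS with h1 | h1
            · exact Or.inl h1
            · exact Or.inr h1.2
        · rw [eq_false_of_ne_true h]
          by_contra hdom
          have hdom' : pvCovered ps x = true := by
            cases hpd : pvCovered ps x
            · exact absurd hpd.symm hdom
            · rfl
          rcases (pv_covered_iff ps x).mp hdom' with ⟨q, hqps, hqne, hqsub, hqor⟩
          have hqnot : q ∉ x :: t := by
            intro hq
            rcases List.mem_cons.mp hq with hq | hq
            · exact hqne (hq ▸ rfl)
            · have hlen : x.2.length ≤ q.2.length :=
                pv_nodup_subset_length (hnd x (List.mem_cons_self ..)) (fun z hz => hqsub z hz)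
              rcases hSx q hq with h1 | h1
              · omega
              · rcases hqor with h2 | h2
                · omega
                · exact absurd h1.2 (by exact fun hlt => by omega)
          rcases hc2 q hqps hqnot with ⟨k, hk, hqk⟩
          exact h (List.any_eq_true.mpr ⟨k, hk, (PySem.Set.issubset_iff x.2 k).mpr
            (fun z hz => hqk (hqsub z hz))⟩)
      by_cases hdom : pvCovered ps x = true
      · -- x is dropped by both
        rw [List.map_cons, List.foldl_cons]
        rw [hkey, hdom]
        simp only [Bool.not_true, Bool.false_eq_true, if_false]
        rw [ih c res hSt hnet
          (fun p hp => hnd p (List.mem_cons_of_mem x hp))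
          (fun p hp => hsub p (List.mem_cons_of_mem x hp))
          (fun k hk => by
            rcases hc1 k hk with ⟨q, hqps, hq2, hqall⟩
            exact ⟨q, hqps, hq2, fun p' hp' => hqall p' (List.mem_cons_of_mem x hp')⟩)
          (fun q hqps hqt => by
            by_cases hqx : q = x
            · subst hqx
              rcases List.any_eq_true.mp (hkey.trans hdom) with ⟨k, hk, hss⟩
              exact ⟨k, hk, fun z hz => ((PySem.Set.issubset_iff q.2 k).mp hss) z hz⟩
            · exact hc2 q hqps (fun hq => by
                rcases List.mem_cons.mp hq with h1 | h1
                · exact hqx h1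
                · exact hqt h1))]
        rw [List.filter_cons, hdom]
        simp
      · -- x is kept by both
        have hdomf : pvCovered ps x = false := eq_false_of_ne_true hdom
        rw [List.map_cons, List.foldl_cons]
        rw [hkey, hdomf]
        simp only [Bool.not_false, if_pos]
        rw [ih (c ++ [x.2]) (res ++ [x.2]) hSt hnet
          (fun p hp => hnd p (List.mem_cons_of_mem x hp))
          (fun p hp => hsub p (List.mem_cons_of_mem x hp))
          (fun k hk => by
            rcases List.mem_append.mp hk with hk | hk
            · rcases hc1 k hk with ⟨q, hqps, hq2, hqall⟩
              exact ⟨q, hqps, hq2, fun p' hp' => hqall p' (List.mem_cons_of_mem x hp')⟩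
            · refine ⟨x, hsub x (List.mem_cons_self ..), (List.mem_singleton.mp hk).symm,
                fun p' hp' => ⟨hSx p' hp', hnex p' hp'⟩⟩)
          (fun q hqps hqt => by
            by_cases hqx : q = x
            · exact ⟨x.2, List.mem_append.mpr (Or.inr (List.mem_singleton.mpr rfl)),
                hqx ▸ (fun z hz => hz)⟩
            · rcases hc2 q hqps (fun hq => by
                rcases List.mem_cons.mp hq with h1 | h1
                · exact hqx h1
                · exact hqt h1) with ⟨k, hk, hqk⟩
              exact ⟨k, List.mem_append.mpr (Or.inl hk), hqk⟩)]
        rw [List.filter_cons, hdomf]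
        simp

theorem pv_pairwise_ne : ∀ (l : List (Int × List Int)),
    l.Pairwise (fun a b => a.1 < b.1) →
    ∀ p ∈ l, ∀ r ∈ l, p ≠ r → p.1 ≠ r.1 := by
  intro l
  induction l with
  | nil => intro _ p hp; simp at hp
  | cons a l ih =>
      intro h p hp r hr hpr
      have hhead := (List.pairwise_cons.mp h).1
      have htail := (List.pairwise_cons.mp h).2
      rcases List.mem_cons.mp hp with hp1 | hp1
      · rcases List.mem_cons.mp hr with hr1 | hr1
        · exact absurd (hp1.trans hr1.symm) hpr
        · rw [hp1]; exact ne_of_lt (hhead r hr1)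
      · rcases List.mem_cons.mp hr with hr1 | hr1
        · rw [hr1]; exact (ne_of_lt (hhead p hp1)).symm
        · exact ih htail p hp1 r hr1 hpr

theorem pv_bool_ext {a b : Bool} (h : a = true ↔ b = true) : a = b := by
  cases a <;> cases b <;> simp_all

-- the triple an (index, key) pair becomes inside B's maxima list
def pvEnrich (p : Int × List Int) : Int × List Int × List Int :=
  (p.1, p.2, PySem.Set.ofList p.2)

-- B's online maxima loop computes exactly the globally non-dominated sublists, in order
theorem pv_maxima_go :
    ∀ (t pre : List (Int × List Int)),
    (∀ p ∈ pre, ∀ q ∈ t, p.1 < q.1) →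
    t.Pairwise (fun a b => a.1 < b.1) →
    pre.Pairwise (fun a b => a.1 < b.1) →
    (∀ p ∈ pre, p.2.Nodup) →
    (∀ q ∈ t, q.2.Nodup) →
    (∀ p ∈ pre, ∃ m, m ∈ pre.filter (fun r => !pvCovered pre r) ∧ p.2 ⊆ m.2) →
    t.foldl pvStepB ((pre.filter (fun r => !pvCovered pre r)).map pvEnrich)
      = ((pre ++ t).filter (fun r => !pvCovered (pre ++ t) r)).map pvEnrich := by
  intro t
  induction t with
  | nil =>
      intro pre _ _ _ _ _ _
      simp
  | cons x t ih =>
      intro pre hcross hT hP hndP hndT hinv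
      have hndx : x.2.Nodup := hndT x (List.mem_cons_self ..)
      have hlt : ∀ p ∈ pre, p.1 < x.1 := fun p hp => hcross p hp x (List.mem_cons_self ..)
      have hsk : PySem.Set.ofList x.2 = x.2 := PySem.Set.ofList_eq_self_of_nodup x.2 hndx
      have hunfold : pvStepB ((pre.filter (fun r => !pvCovered pre r)).map pvEnrich) x
          = if ((pre.filter (fun r => !pvCovered pre r)).map pvEnrich).any
                (fun t => PySem.Set.issubset (PySem.Set.ofList x.2) t.2.2) then
              ((pre.filter (fun r => !pvCovered pre r)).map pvEnrich)
            else (((pre.filter (fun r => !pvCovered pre r)).map pvEnrich).filter (fun t =>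
                !(PySem.Set.issubset t.2.2 (PySem.Set.ofList x.2) &&
                  decide (t.2.1.length < x.2.length)))) ++
              [(x.1, x.2, PySem.Set.ofList x.2)] := rfl
      have hcond : (((pre.filter (fun r => !pvCovered pre r)).map pvEnrich).any
            (fun t => PySem.Set.issubset (PySem.Set.ofList x.2) t.2.2) = true)
          ↔ ∃ r, r ∈ pre ∧ pvCovered pre r = false ∧ (∀ z ∈ x.2, z ∈ r.2) := by
        constructor
        · intro h
          rcases List.any_eq_true.mp h with ⟨tt, htt, hss⟩
          rcases List.mem_map.mp htt with ⟨r, hrf, rfl⟩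
          rcases List.mem_filter.mp hrf with ⟨hrpre, hrc⟩
          refine ⟨r, hrpre, by simpa using hrc, ?_⟩
          intro z hz
          have h1 : z ∈ PySem.Set.ofList r.2 := by
            refine (PySem.Set.issubset_iff _ _).mp hss z ?_
            rw [PySem.Set.mem_ofList]
            exact hz
          rw [PySem.Set.mem_ofList] at h1
          exact h1
        · rintro ⟨r, hrpre, hrc, hsub⟩
          refine List.any_eq_true.mpr ⟨pvEnrich r,
            List.mem_map.mpr ⟨r, List.mem_filter.mpr ⟨hrpre, by simp [hrc]⟩, rfl⟩, ?_⟩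
          refine (PySem.Set.issubset_iff _ _).mpr ?_
          intro z hz
          show z ∈ PySem.Set.ofList r.2
          rw [PySem.Set.mem_ofList] at hz ⊢
          exact hsub z hz
      -- induction hypotheses that do not depend on whether x is kept
      have hcross' : ∀ p ∈ pre ++ [x], ∀ q ∈ t, p.1 < q.1 := by
        intro p hp q hq
        rcases List.mem_append.mp hp with hp | hp
        · exact hcross p hp q (List.mem_cons_of_mem x hq)
        · have := List.mem_singleton.mp hp; subst this
          exact (List.pairwise_cons.mp hT).1 q hq
      have hT' : t.Pairwise (fun a b => a.1 < b.1) := (List.pairwise_cons.mp hT).2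
      have hP' : (pre ++ [x]).Pairwise (fun a b => a.1 < b.1) :=
        List.pairwise_append.mpr ⟨hP, List.pairwise_singleton _ _,
          fun p hp q hq => by
            have := List.mem_singleton.mp hq; subst this
            exact hlt p hp⟩
      have hndP' : ∀ p ∈ pre ++ [x], p.2.Nodup := by
        intro p hp
        rcases List.mem_append.mp hp with hp | hp
        · exact hndP p hp
        · have := List.mem_singleton.mp hp; subst this
          exact hndx
      have hndT' : ∀ q ∈ t, q.2.Nodup := fun q hq => hndT q (List.mem_cons_of_mem x hq)
      rw [List.foldl_cons, hunfold]
      cases hC : ((pre.filter (fun r => !pvCovered pre r)).map pvEnrich).any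
          (fun t => PySem.Set.issubset (PySem.Set.ofList x.2) t.2.2) with
      | true =>
          -- x is a subset of a current maximum: dropped, nothing evicted
          rw [if_pos rfl]
          obtain ⟨r, hrpre, hrcov, hxr⟩ := hcond.mp hC
          have hlenxr : x.2.length ≤ r.2.length :=
            pv_nodup_subset_length hndx (fun z hz => hxr z hz)
          have hcovx : pvCovered (pre ++ [x]) x = true :=
            (pv_covered_iff _ _).mpr ⟨r, List.mem_append_left _ hrpre,
              ne_of_lt (hlt r hrpre), hxr, Or.inr (hlt r hrpre)⟩
          have hsame : ∀ p ∈ pre, pvCovered (pre ++ [x]) p = pvCovered pre p := by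
            intro p hp
            cases hc : pvCovered pre p with
            | true =>
                rcases (pv_covered_iff _ _).mp hc with ⟨q, hq, h1, h2, h3⟩
                exact (pv_covered_iff _ _).mpr ⟨q, List.mem_append_left _ hq, h1, h2, h3⟩
            | false =>
                cases hc2 : pvCovered (pre ++ [x]) p with
                | false => rfl
                | true =>
                    exfalso
                    rcases (pv_covered_iff _ _).mp hc2 with ⟨q, hq, hqne, hqsub, hqor⟩
                    rcases List.mem_append.mp hq with hq | hq
                    · exact absurd ((pv_covered_iff _ _).mpr ⟨q, hq, hqne, hqsub, hqor⟩)
                        (by simp [hc])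
                    · have hqx : q = x := List.mem_singleton.mp hq
                      rw [hqx] at hqsub hqor
                      have hplen : p.2.length < x.2.length := by
                        rcases hqor with h | h
                        · exact h
                        · exact absurd h (not_lt.mpr (hlt p hp).le)
                      have hpr : p ≠ r := by
                        intro e; subst e
                        have : x.2.length ≤ p.2.length :=
                          pv_nodup_subset_length hndx (fun z hz => hxr z hz)
                        omega
                      exact absurd ((pv_covered_iff _ _).mpr ⟨r, hrpre,
                          pv_pairwise_ne pre hP r hrpre p hp (fun e => hpr e.symm),
                          fun z hz => hxr z (hqsub z hz),
                          Or.inl (lt_of_lt_of_le hplen hlenxr)⟩)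
                        (by simp [hc])
          have hfilters : (pre ++ [x]).filter (fun r => !pvCovered (pre ++ [x]) r)
              = pre.filter (fun r => !pvCovered pre r) := by
            rw [List.filter_append]
            have h2 : [x].filter (fun r => !pvCovered (pre ++ [x]) r) = [] := by
              simp [hcovx]
            rw [h2, List.append_nil]
            exact List.filter_congr (fun p hp => by rw [hsame p hp])
          have hinv' : ∀ p ∈ pre ++ [x],
              ∃ m, m ∈ (pre ++ [x]).filter (fun r => !pvCovered (pre ++ [x]) r) ∧ p.2 ⊆ m.2 := by
            rw [hfilters]
            intro p hp
            rcases List.mem_append.mp hp with hp | hp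
            · exact hinv p hp
            · have := List.mem_singleton.mp hp; subst this
              exact ⟨r, List.mem_filter.mpr ⟨hrpre, by simp [hrcov]⟩, fun z hz => hxr z hz⟩
          calc t.foldl pvStepB ((pre.filter (fun r => !pvCovered pre r)).map pvEnrich)
              = t.foldl pvStepB (((pre ++ [x]).filter
                  (fun r => !pvCovered (pre ++ [x]) r)).map pvEnrich) := by rw [hfilters]
            _ = (((pre ++ [x]) ++ t).filter
                  (fun r => !pvCovered ((pre ++ [x]) ++ t) r)).map pvEnrich :=
                ih (pre ++ [x]) hcross' hT' hP' hndP' hndT' hinv'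
            _ = ((pre ++ x :: t).filter (fun r => !pvCovered (pre ++ x :: t) r)).map pvEnrich := by
                rw [List.append_assoc, List.singleton_append]
      | false =>
          -- x is kept; its strict subsets among the maxima are evicted
          rw [if_neg (by simp)]
          have hcovx : pvCovered (pre ++ [x]) x = false := by
            cases hc2 : pvCovered (pre ++ [x]) x with
            | false => rfl
            | true =>
                exfalso
                rcases (pv_covered_iff _ _).mp hc2 with ⟨q, hq, hqne, hqsub, hqor⟩
                rcases List.mem_append.mp hq with hq | hq
                · rcases hinv q hq with ⟨m, hmf, hqm⟩
                  rcases List.mem_filter.mp hmf with ⟨hmpre, hmc⟩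
                  exact absurd (hcond.mpr ⟨m, hmpre, by simpa using hmc,
                      fun z hz => hqm (hqsub z hz)⟩)
                    (fun hh => absurd (hh.symm.trans hC) (by decide))
                · have := List.mem_singleton.mp hq; subst this
                  exact hqne rfl
          have hsplit : ∀ p ∈ pre, pvCovered (pre ++ [x]) p
              = (pvCovered pre p ||
                 (PySem.Set.issubset p.2 x.2 && decide (p.2.length < x.2.length))) := by
            intro p hp
            refine pv_bool_ext ?_
            rw [Bool.or_eq_true, Bool.and_eq_true, decide_eq_true_eq]
            constructor
            · intro h
              rcases (pv_covered_iff _ _).mp h with ⟨q, hq, hqne, hqsub, hqor⟩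
              rcases List.mem_append.mp hq with hq | hq
              · exact Or.inl ((pv_covered_iff _ _).mpr ⟨q, hq, hqne, hqsub, hqor⟩)
              · have hqx : q = x := List.mem_singleton.mp hq
                rw [hqx] at hqsub hqor
                refine Or.inr ⟨(PySem.Set.issubset_iff _ _).mpr hqsub, ?_⟩
                rcases hqor with h | h
                · exact h
                · exact absurd h (not_lt.mpr (hlt p hp).le)
            · intro h
              rcases h with h | ⟨hsub, hlen⟩
              · rcases (pv_covered_iff _ _).mp h with ⟨q, hq, hqne, hqsub, hqor⟩
                exact (pv_covered_iff _ _).mpr ⟨q, List.mem_append_left _ hq, hqne, hqsub, hqor⟩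
              · exact (pv_covered_iff _ _).mpr
                  ⟨x, List.mem_append_right _ (List.mem_singleton.mpr rfl),
                   (ne_of_lt (hlt p hp)).symm, (PySem.Set.issubset_iff _ _).mp hsub, Or.inl hlen⟩
          have hfilters : (pre ++ [x]).filter (fun r => !pvCovered (pre ++ [x]) r)
              = (pre.filter (fun r => !pvCovered pre r)).filter
                  (fun r => !(PySem.Set.issubset r.2 x.2 &&
                    decide (r.2.length < x.2.length))) ++ [x] := by
            rw [List.filter_append]
            have h2 : [x].filter (fun r => !pvCovered (pre ++ [x]) r) = [x] := by
              simp [hcovx]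
            rw [h2, List.filter_filter]
            refine congrArg (fun l => l ++ [x]) (List.filter_congr fun p hp => ?_)
            rw [hsplit p hp, Bool.not_or, Bool.and_comm]
          have hmapstep : (((pre.filter (fun r => !pvCovered pre r)).map pvEnrich).filter
                (fun t => !(PySem.Set.issubset t.2.2 (PySem.Set.ofList x.2) &&
                  decide (t.2.1.length < x.2.length))))
              = ((pre.filter (fun r => !pvCovered pre r)).filter
                  (fun r => !(PySem.Set.issubset r.2 x.2 &&
                    decide (r.2.length < x.2.length)))).map pvEnrich := by
            rw [hsk, List.filter_map]
            congr 1
            refine List.filter_congr fun p hp => ?_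
            have hpnodup : p.2.Nodup := hndP p (List.mem_of_mem_filter hp)
            simp [Function.comp, pvEnrich, PySem.Set.ofList_eq_self_of_nodup p.2 hpnodup]
          have hstate : (((pre.filter (fun r => !pvCovered pre r)).map pvEnrich).filter
                (fun t => !(PySem.Set.issubset t.2.2 (PySem.Set.ofList x.2) &&
                  decide (t.2.1.length < x.2.length)))) ++ [(x.1, x.2, PySem.Set.ofList x.2)]
              = ((pre ++ [x]).filter (fun r => !pvCovered (pre ++ [x]) r)).map pvEnrich := by
            rw [hfilters, List.map_append, hmapstep]
            rfl
          have hinv' : ∀ p ∈ pre ++ [x],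
              ∃ m, m ∈ (pre ++ [x]).filter (fun r => !pvCovered (pre ++ [x]) r) ∧ p.2 ⊆ m.2 := by
            rw [hfilters]
            intro p hp
            rcases List.mem_append.mp hp with hp | hp
            · rcases hinv p hp with ⟨m, hmf, hpm⟩
              by_cases hg : (PySem.Set.issubset m.2 x.2 &&
                  decide (m.2.length < x.2.length)) = true
              · rw [Bool.and_eq_true] at hg
                have hmx : ∀ z ∈ m.2, z ∈ x.2 := (PySem.Set.issubset_iff _ _).mp hg.1
                exact ⟨x, List.mem_append_right _ (List.mem_singleton.mpr rfl),
                  fun z hz => hmx z (hpm hz)⟩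
              · exact ⟨m, List.mem_append_left _ (List.mem_filter.mpr ⟨hmf, by simp [hg]⟩), hpm⟩
            · have := List.mem_singleton.mp hp; subst this
              exact ⟨p, List.mem_append_right _ (List.mem_singleton.mpr rfl), fun z hz => hz⟩
          rw [hstate]
          calc t.foldl pvStepB (((pre ++ [x]).filter
                  (fun r => !pvCovered (pre ++ [x]) r)).map pvEnrich)
              = (((pre ++ [x]) ++ t).filter
                  (fun r => !pvCovered ((pre ++ [x]) ++ t) r)).map pvEnrich :=
                ih (pre ++ [x]) hcross' hT' hP' hndP' hndT' hinv'
            _ = ((pre ++ x :: t).filter (fun r => !pvCovered (pre ++ x :: t) r)).map pvEnrich := by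
                rw [List.append_assoc, List.singleton_append]

theorem pv_main (ks : List (List Int)) (hndk : ∀ (i : Nat) (h : i < ks.length), ks[i].Nodup) :
    ((PySem.List.sorted ks (fun ele => ele.length) true).foldl
        (fun st ele => if !(st.1.any (fun req => PySem.Set.issubset ele req)) then
            (st.1 ++ [ele], st.2 ++ [ele]) else st)
        (([] : List (List Int)), ([] : List (List Int)))).2 =
      PySem.List.sorted
        (((PySem.List.enumerate ks 0).foldl pvStepB []).map (fun t => t.2.1))
        (fun k => k.length) true := by
  have hmapsnd : (PySem.List.enumerate ks 0).map (fun p => p.2) = ks :=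
    PySem.List.map_snd_enumerate ks 0
  have hndps : ∀ q ∈ PySem.List.enumerate ks 0, q.2.Nodup := by
    intro q hq
    rw [PySem.List.mem_enumerate_iff] at hq
    rcases hq with ⟨k, hk, rfl⟩
    exact hndk k hk
  have hBlist : ((PySem.List.enumerate ks 0).foldl pvStepB []).map (fun t => t.2.1)
      = ((PySem.List.enumerate ks 0).filter
          (fun r => !pvCovered (PySem.List.enumerate ks 0) r)).map (fun p => p.2) := by
    have h := pv_maxima_go (PySem.List.enumerate ks 0) []
      (by simp) (PySem.List.pairwise_lt_enumerate ks 0) List.Pairwise.nil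
      (by simp) hndps (by simp)
    simp only [List.filter_nil, List.map_nil, List.nil_append] at h
    rw [h, List.map_map]
    rfl
  have htperm : (PySem.List.sorted (PySem.List.enumerate ks 0) (fun p => p.2.length) true).Perm
      (PySem.List.enumerate ks 0) :=
    PySem.List.sorted_perm (PySem.List.enumerate ks 0) (fun p => p.2.length) true
  have hsortA : PySem.List.sorted ks (fun ele => ele.length) true =
      (PySem.List.sorted (PySem.List.enumerate ks 0) (fun p => p.2.length) true).map
        (fun p => p.2) := by
    rw [pv_map_snd_sorted, hmapsnd]
  have hS : (PySem.List.sorted (PySem.List.enumerate ks 0) (fun p => p.2.length) true).Pairwise pvS := by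
    rw [pv_sortedP_foldl]
    exact pv_pairwise_S_foldl (PySem.List.enumerate ks 0) [] List.Pairwise.nil (by simp)
      (PySem.List.pairwise_lt_enumerate ks 0)
  have hne : (PySem.List.sorted (PySem.List.enumerate ks 0) (fun p => p.2.length) true).Pairwise
      (fun a b => a.1 ≠ b.1) :=
    (List.Perm.pairwise_iff (fun h e => h e.symm) htperm).mpr
      ((PySem.List.pairwise_lt_enumerate ks 0).imp (fun h => ne_of_lt h))
  have hnd : ∀ p ∈ PySem.List.sorted (PySem.List.enumerate ks 0) (fun p => p.2.length) true,
      p.2.Nodup := by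
    intro p hp
    have hp' := htperm.mem_iff.mp hp
    rw [PySem.List.mem_enumerate_iff] at hp'
    rcases hp' with ⟨k, hk, hpk⟩
    subst hpk
    exact hndk k hk
  rw [hsortA,
    pv_greedy_go (PySem.List.enumerate ks 0) _ [] [] hS hne hnd
      (fun p hp => htperm.mem_iff.mp hp)
      (by intro k hk; simp at hk)
      (by intro q hq hqt; exact absurd (htperm.mem_iff.mpr hq) hqt),
    List.nil_append, hBlist, ← pv_map_snd_sorted, pv_sorted_filter]

-- ===== VERDICT (by name: the statement is the Claim_ definition above) =====
theorem removeSublist_spec : Claim_equal_removeSublist := by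
  intro lst _
  show removeSublist lst = removeSublist_alt lst
  unfold removeSublist removeSublist_alt
  exact pv_main (lst.map PySem.List.dedup)
    (fun i h => by
      simp only [List.getElem_map]
      exact PySem.List.nodup_dedup _)
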